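-- pv_equiv track=rewrite | github.com/MarceloBarillas10/Venmito-MarceloBarillas10 | helpers/cleanup_funcs.py | device_list
-- ===== SOURCE A (Python) =====
-- def device_list(devices: list):
--     android = 0
--     iphone = 0
--     desktop = 0
--     for device in devices:
--         if device == 'Android':
--             android += 1
--         elif device == 'Iphone':
--             iphone += 1
--         elif device == 'Desktop':
--             desktop += 1
--     return [android, desktop, iphone]
-- ===== SOURCE B (Python) =====
-- def device_list(devices: list):
--     return [devices.count('Android'), devices.count('Desktop'), devices.count('Iphone')]
-- ===== Notes on version B (the rewrite author's own statement) =====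
-- stated objective: simpler
-- what changed: Replaces the single branching accumulator loop with three independent list.count scans, one per device name.
import Mathlib
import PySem

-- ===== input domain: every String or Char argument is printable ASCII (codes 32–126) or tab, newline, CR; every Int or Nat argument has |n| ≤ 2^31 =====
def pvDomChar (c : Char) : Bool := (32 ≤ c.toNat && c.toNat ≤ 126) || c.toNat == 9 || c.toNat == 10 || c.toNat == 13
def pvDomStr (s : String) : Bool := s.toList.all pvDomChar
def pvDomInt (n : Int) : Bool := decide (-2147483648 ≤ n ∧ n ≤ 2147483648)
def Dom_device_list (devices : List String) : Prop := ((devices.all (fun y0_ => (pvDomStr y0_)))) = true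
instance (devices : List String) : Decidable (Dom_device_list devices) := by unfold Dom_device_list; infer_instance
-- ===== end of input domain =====

-- B replaces the single branching accumulator loop with three independent list.count scans (simpler).

-- ===== PORT A =====
-- literal port of A: one fold carrying (android, iphone, desktop)
def device_list (devices : List String) : List Int :=
  let s := devices.foldl
    (fun (acc : Int × Int × Int) device =>
      if device = "Android" then (acc.1 + 1, acc.2.1, acc.2.2)
      else if device = "Iphone" then (acc.1, acc.2.1 + 1, acc.2.2)
      else if device = "Desktop" then (acc.1, acc.2.1, acc.2.2 + 1)
      else acc)
    (0, 0, 0)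
  [s.1, s.2.2, s.2.1]

-- ===== PORT B =====
def device_list_alt (devices : List String) : List Int :=
  [PySem.List.count devices "Android", PySem.List.count devices "Desktop", PySem.List.count devices "Iphone"]

-- ===== PRECONDITION & SPEC =====
def Spec_device_list (devices : List String) (out : List Int) : Prop := out = device_list_alt devices
instance (devices : List String) (out : List Int) : Decidable (Spec_device_list devices out) := by unfold Spec_device_list; infer_instance

-- ===== CLAIM (what is proved, stated in full; the proofs are below) =====
def Claim_equal_device_list : Prop := ∀ (devices : List String), Dom_device_list devices → Spec_device_list devices (device_list devices)

-- ===== LEMMAS AND PROOFS =====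
lemma device_list_fold_inv (devices : List String) (a i d : Int) :
    devices.foldl
      (fun (acc : Int × Int × Int) device =>
        if device = "Android" then (acc.1 + 1, acc.2.1, acc.2.2)
        else if device = "Iphone" then (acc.1, acc.2.1 + 1, acc.2.2)
        else if device = "Desktop" then (acc.1, acc.2.1, acc.2.2 + 1)
        else acc)
      (a, i, d)
    = (a + PySem.List.count devices "Android",
       i + PySem.List.count devices "Iphone",
       d + PySem.List.count devices "Desktop") := by
  induction devices generalizing a i d with
  | nil => simp [PySem.List.count]
  | cons x xs ih =>
      simp only [List.foldl_cons]
      by_cases hA : x = "Android"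
      · simp [hA, ih, PySem.List.count, List.count_cons, add_assoc, add_comm, add_left_comm]
      · by_cases hI : x = "Iphone"
        · simp [hA, hI, ih, PySem.List.count, List.count_cons, add_assoc, add_comm, add_left_comm]
        · by_cases hD : x = "Desktop"
          · simp [hA, hI, hD, ih, PySem.List.count, List.count_cons, add_assoc, add_comm, add_left_comm]
          · simp [hA, hI, hD, ih, PySem.List.count, List.count_cons]

-- ===== VERDICT (by name: the statement is the Claim_ definition above) =====
theorem device_list_spec : Claim_equal_device_list := by
  intro devices _
  unfold Spec_device_list device_list device_list_alt
  simp [device_list_fold_inv]
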